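-- pv_equiv track=rewrite | github.com/CapstoneCOMP5703/21_S1_IoT_Prediction_Fitness_Recommender | appb.py | splitMeal
-- ===== SOURCE A (Python) =====
-- def splitMeal(data):
--     length=len(data)
--     breakfast_num=0
--     lunch_num=0
--     dinner_num=0
--     dessert_num=0
--     for i in range(0,length):
--         data_list=data[i]
--         if data_list == 'breakfast':
--             breakfast_num=breakfast_num+1
--         elif data_list == 'lunch':
--             lunch_num=lunch_num+1
--         elif data_list == 'dinner':
--             dinner_num=dinner_num+1
--         else:
--             dessert_num=dessert_num+1
--     return breakfast_num,lunch_num,dinner_num,dessert_num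
-- ===== SOURCE B (Python) =====
-- def splitMeal(data):
--     breakfast = data.count('breakfast')
--     lunch = data.count('lunch')
--     dinner = data.count('dinner')
--     return breakfast, lunch, dinner, len(data) - breakfast - lunch - dinner
-- ===== Notes on version B (the rewrite author's own statement) =====
-- stated objective: simpler
-- what changed: Replaces the guarded accumulator loop by three list.count scans and derives the dessert catch-all as len(data) minus the other three counts.
import Mathlib
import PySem

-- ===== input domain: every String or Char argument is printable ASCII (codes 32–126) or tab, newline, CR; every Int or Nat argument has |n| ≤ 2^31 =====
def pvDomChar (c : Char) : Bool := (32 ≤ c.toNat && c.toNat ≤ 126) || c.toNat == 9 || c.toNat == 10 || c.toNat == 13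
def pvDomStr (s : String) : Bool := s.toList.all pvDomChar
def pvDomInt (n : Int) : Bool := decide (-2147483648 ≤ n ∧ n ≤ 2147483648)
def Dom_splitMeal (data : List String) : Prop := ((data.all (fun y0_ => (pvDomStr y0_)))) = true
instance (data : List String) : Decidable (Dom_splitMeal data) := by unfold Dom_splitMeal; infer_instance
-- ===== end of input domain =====

-- B replaces A's guarded accumulator loop with three list.count scans plus dessert = len - others (objective: simpler).


-- ===== PORT A =====
-- Port of A: fold over the list carrying the four counters, branches in source order.
def splitMeal (data : List String) : Int × Int × Int × Int :=
  data.foldl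
    (fun st d =>
      let (b, l, di, de) := st
      if d == "breakfast" then (b + 1, l, di, de)
      else if d == "lunch" then (b, l + 1, di, de)
      else if d == "dinner" then (b, l, di + 1, de)
      else (b, l, di, de + 1))
    (0, 0, 0, 0)

-- ===== PORT B =====
-- Port of B: three count scans, dessert = length minus the other three.
def splitMeal_alt (data : List String) : Int × Int × Int × Int :=
  let breakfast : Int := PySem.List.count data "breakfast"
  let lunch : Int := PySem.List.count data "lunch"
  let dinner : Int := PySem.List.count data "dinner"
  (breakfast, lunch, dinner, (data.length : Int) - breakfast - lunch - dinner)

-- ===== PRECONDITION & SPEC =====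
def Spec_splitMeal (data : List String) (out : Int × Int × Int × Int) : Prop := out = splitMeal_alt data
instance (data : List String) (out : Int × Int × Int × Int) : Decidable (Spec_splitMeal data out) := by unfold Spec_splitMeal; infer_instance

-- ===== CLAIM (what is proved, stated in full; the proofs are below) =====
def Claim_equal_splitMeal : Prop := ∀ (data : List String), Dom_splitMeal data → Spec_splitMeal data (splitMeal data)

-- ===== LEMMAS AND PROOFS =====

-- ===== VERDICT (by name: the statement is the Claim_ definition above) =====
lemma splitMeal_loop (data : List String) (b l di de : Int) :
    data.foldl
      (fun st d =>
        let (b, l, di, de) := st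
        if d == "breakfast" then (b + 1, l, di, de)
        else if d == "lunch" then (b, l + 1, di, de)
        else if d == "dinner" then (b, l, di + 1, de)
        else (b, l, di, de + 1))
      (b, l, di, de)
    = (b + PySem.List.count data "breakfast",
       l + PySem.List.count data "lunch",
       di + PySem.List.count data "dinner",
       de + ((data.length : Int) - PySem.List.count data "breakfast"
             - PySem.List.count data "lunch" - PySem.List.count data "dinner")) := by
  induction data generalizing b l di de with
  | nil => simp [PySem.List.count]
  | cons x xs ih =>
    simp only [List.foldl, PySem.List.count, List.countP_cons]
    rw [ih]
    by_cases hb : x = "breakfast"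
    · subst hb; simp; first | (refine ⟨?_, ?_⟩ <;> first | trivial | ring | (push_cast; ring)) | trivial | ring | (push_cast; ring)
    · by_cases hl : x = "lunch"
      · subst hl; simp; first | (refine ⟨?_, ?_⟩ <;> first | trivial | ring | (push_cast; ring)) | trivial | ring | (push_cast; ring)
      · by_cases hd : x = "dinner"
        · subst hd; simp; first | (refine ⟨?_, ?_⟩ <;> first | trivial | ring | (push_cast; ring)) | trivial | ring | (push_cast; ring)
        · simp [hb, hl, hd]; push_cast; ring

theorem splitMeal_spec : Claim_equal_splitMeal := by
  intro data _
  unfold Spec_splitMeal splitMeal splitMeal_alt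
  rw [splitMeal_loop]
  simp
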